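-- pv_equiv track=rewrite | github.com/batamorphism/Coding | Python/AtCoder/old/_joi2012yo_e_1003.py | nei_of
-- ===== SOURCE A (Python) =====
-- def nei_of(node: tuple, r_end: int, c_end: int):
--     # 壁は無視して近傍を6つ返す
--     # r % 2 == 1の場合、八個の近傍のうち、(r+1, c-1), (r-1, c-1)の2つを除く
--     # r % 2 == 0の場合、八個の近傍のうち、(r+1, c+1), (r-1, c+1)の2つを除く
--     pre_r, pre_c = node
--     dr_list = [-1, 0, 1]
--     dc_list = [-1, 0, 1]
--     ans = []
--     for dr in dr_list:
--         for dc in dc_list: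
--             cur_r = pre_r + dr
--             cur_c = pre_c + dc
--             if cur_r < 0 or cur_r >= r_end or cur_c < 0 or cur_c >= c_end:
--                 continue
--             if dr == dc == 0:
--                 continue
--             if pre_r % 2 == 0:
--                 if dr == 1 and dc == 1:
--                     continue
--                 if dr == -1 and dc == 1:
--                     continue
--             else:
--                 if dr == 1 and dc == -1:
--                     continue
--                 if dr == -1 and dc == -1:
--                     continue
--             ans.append((cur_r, cur_c))
--     return ans
-- ===== SOURCE B (Python) =====
-- # Axial-coordinate approach: convert the offset ("odd-r") coordinate to axial
-- # coordinates, where the six hex neighbors are one fixed, parity-free direction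
-- # list; convert each neighbor back and bounds-check it.
-- AXIAL_DIRS = [(0, -1), (1, -1), (-1, 0), (1, 0), (-1, 1), (0, 1)]  # (dq, dr)
--
--
-- def nei_of(node: tuple, r_end: int, c_end: int):
--     r, c = node
--     q = c - (r - r % 2) // 2  # offset -> axial
--     ans = []
--     for dq, drr in AXIAL_DIRS:
--         nq, nr = q + dq, r + drr
--         nc = nq + (nr - nr % 2) // 2  # axial -> offset
--         if 0 <= nr < r_end and 0 <= nc < c_end:
--             ans.append((nr, nc))
--     return ans
-- ===== Notes on version B (the rewrite author's own statement) =====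
-- stated objective: alternative
-- what changed: Instead of enumerating the 3x3 offset neighborhood and filtering with parity-dependent exclusion tests, B converts the cell to axial hex coordinates, walks one fixed parity-free list of the six axial directions, and converts each neighbor back to offset coordinates before the bounds check.
import Mathlib
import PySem

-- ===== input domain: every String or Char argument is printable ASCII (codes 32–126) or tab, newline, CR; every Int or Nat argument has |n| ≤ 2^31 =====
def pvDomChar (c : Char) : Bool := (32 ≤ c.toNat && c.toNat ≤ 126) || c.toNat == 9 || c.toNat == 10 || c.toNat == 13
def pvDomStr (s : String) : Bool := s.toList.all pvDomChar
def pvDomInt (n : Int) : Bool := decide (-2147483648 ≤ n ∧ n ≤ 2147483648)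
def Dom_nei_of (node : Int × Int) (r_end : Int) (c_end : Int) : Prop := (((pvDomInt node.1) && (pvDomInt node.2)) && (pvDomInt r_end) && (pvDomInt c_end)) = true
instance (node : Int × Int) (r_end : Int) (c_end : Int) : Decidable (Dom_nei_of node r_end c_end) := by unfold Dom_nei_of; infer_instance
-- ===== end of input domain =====

-- B replaces A's 3x3 enumerate-and-filter (with parity exclusion tests) by a conversion to
-- axial hex coordinates, one fixed parity-free list of the six axial directions, and a
-- conversion back before the bounds check (alternative algorithm, same cost).

-- ===== PORT A =====
def nei_of (node : Int × Int) (r_end : Int) (c_end : Int) : List (Int × Int) :=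
  let pre_r := node.1
  let pre_c := node.2
  let dr_list : List Int := [-1, 0, 1]
  let dc_list : List Int := [-1, 0, 1]
  dr_list.foldl (fun ans dr =>
    dc_list.foldl (fun ans dc =>
      let cur_r := pre_r + dr
      let cur_c := pre_c + dc
      if cur_r < 0 ∨ cur_r ≥ r_end ∨ cur_c < 0 ∨ cur_c ≥ c_end then ans
      else if dr = 0 ∧ dc = 0 then ans
      else if PySem.Int.mod pre_r 2 = 0 then
        if dr = 1 ∧ dc = 1 then ans
        else if dr = -1 ∧ dc = 1 then ans
        else ans ++ [(cur_r, cur_c)]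
      else
        if dr = 1 ∧ dc = -1 then ans
        else if dr = -1 ∧ dc = -1 then ans
        else ans ++ [(cur_r, cur_c)]) ans) []

-- ===== PORT B =====
-- the six hex neighbor directions in axial coordinates, parity-free (AXIAL_DIRS in Source B)
def pvAxialDirs : List (Int × Int) := [(0, -1), (1, -1), (-1, 0), (1, 0), (-1, 1), (0, 1)]

def nei_of_alt (node : Int × Int) (r_end : Int) (c_end : Int) : List (Int × Int) :=
  let r := node.1
  let c := node.2
  let q := c - PySem.Int.floordiv (r - PySem.Int.mod r 2) 2
  pvAxialDirs.foldl (fun ans d =>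
    let nq := q + d.1
    let nr := r + d.2
    let nc := nq + PySem.Int.floordiv (nr - PySem.Int.mod nr 2) 2
    if 0 ≤ nr ∧ nr < r_end ∧ 0 ≤ nc ∧ nc < c_end then ans ++ [(nr, nc)] else ans) []

-- ===== PRECONDITION & SPEC =====
def Spec_nei_of (node : Int × Int) (r_end : Int) (c_end : Int) (out : List (Int × Int)) : Prop := out = nei_of_alt node r_end c_end
instance (node : Int × Int) (r_end : Int) (c_end : Int) (out : List (Int × Int)) : Decidable (Spec_nei_of node r_end c_end out) := by unfold Spec_nei_of; infer_instance

-- ===== CLAIM (what is proved, stated in full; the proofs are below) =====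
def Claim_equal_nei_of : Prop := ∀ (node : Int × Int) (r_end : Int) (c_end : Int), Dom_nei_of node r_end c_end → Spec_nei_of node r_end c_end (nei_of node r_end c_end)

-- ===== LEMMAS AND PROOFS =====

-- combined keep-condition of A's inner body
def Qa (r c re ce dr dc : Int) : Bool :=
  decide (¬(r + dr < 0 ∨ r + dr ≥ re ∨ c + dc < 0 ∨ c + dc ≥ ce) ∧ ¬(dr = 0 ∧ dc = 0) ∧
    (if PySem.Int.mod r 2 = 0 then ¬(dr = 1 ∧ dc = 1) ∧ ¬(dr = -1 ∧ dc = 1)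
     else ¬(dr = 1 ∧ dc = -1) ∧ ¬(dr = -1 ∧ dc = -1)))

theorem A_eq (r c re ce : Int) : nei_of (r, c) re ce =
    ([-1, 0, 1] : List Int).flatMap (fun dr =>
      ((([-1, 0, 1] : List Int).filter (fun dc => Qa r c re ce dr dc)).map
        (fun dc => ((r + dr, c + dc) : Int × Int)))) := by
  unfold nei_of
  rw [PySem.List.foldl_congr_mem _ _
    (fun ans dr => ans ++ ((([-1, 0, 1] : List Int).filter (fun dc => Qa r c re ce dr dc)).map
        (fun dc => ((r + dr, c + dc) : Int × Int)))) _ ?_]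
  · rw [PySem.List.foldl_append_eq_flatMap]; simp
  · intro ans dr _
    rw [PySem.List.foldl_congr_mem _ _
      (fun ans dc => if Qa r c re ce dr dc then ans ++ [((r + dr, c + dc) : Int × Int)] else ans) _ ?_]
    · rw [PySem.List.foldl_append_if]
    · intro ans dc _
      simp only [Qa]
      split_ifs <;> simp_all

theorem B_eq (r c re ce : Int) : nei_of_alt (r, c) re ce =
    (pvAxialDirs.filter (fun d => decide (0 ≤ r + d.2 ∧ r + d.2 < re ∧
        0 ≤ c - PySem.Int.floordiv (r - PySem.Int.mod r 2) 2 + d.1 +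
          PySem.Int.floordiv (r + d.2 - PySem.Int.mod (r + d.2) 2) 2 ∧
        c - PySem.Int.floordiv (r - PySem.Int.mod r 2) 2 + d.1 +
          PySem.Int.floordiv (r + d.2 - PySem.Int.mod (r + d.2) 2) 2 < ce))).map
      (fun d => ((r + d.2, c - PySem.Int.floordiv (r - PySem.Int.mod r 2) 2 + d.1 +
          PySem.Int.floordiv (r + d.2 - PySem.Int.mod (r + d.2) 2) 2) : Int × Int)) := by
  unfold nei_of_alt
  rw [PySem.List.foldl_append_ite]
  simp

set_option maxHeartbeats 3000000 in
theorem nei_of_main (r c re ce : Int) : nei_of (r, c) re ce = nei_of_alt (r, c) re ce := by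
  rw [A_eq, B_eq]
  have e2 : (0:Int) < 2 := by norm_num
  simp only [PySem.Int.mod_eq_emod_of_pos e2, PySem.Int.floordiv_eq_ediv_of_pos e2]
  by_cases hp : r % 2 = 0
  · have h2 : (r + -1) % 2 = 1 := by omega
    have h3 : (r + 1) % 2 = 1 := by omega
    simp [pvAxialDirs, Qa, hp, not_or, not_lt, not_le]
    simp only [List.filter_cons, List.filter_nil]
    simp [h2, h3, hp]
    have p1 : (0 ≤ c - r / 2 + (r + -1 - 1) / 2) = (1 ≤ c) := by rw [eq_iff_iff]; omega
    have p2 : (c - r / 2 + (r + -1 - 1) / 2 < ce) = (c ≤ ce) := by rw [eq_iff_iff]; omega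
    have p3 : (0 ≤ c - r / 2 + 1 + (r + -1 - 1) / 2) = (0 ≤ c) := by rw [eq_iff_iff]; omega
    have p4 : (c - r / 2 + 1 + (r + -1 - 1) / 2 < ce) = (c < ce) := by rw [eq_iff_iff]; omega
    have p5 : (0 ≤ c - r / 2 + -1 + r / 2) = (1 ≤ c) := by rw [eq_iff_iff]; omega
    have p6 : (c - r / 2 + -1 + r / 2 < ce) = (c ≤ ce) := by rw [eq_iff_iff]; omega
    have p7 : (0 ≤ c - r / 2 + 1 + r / 2) = (0 ≤ c + 1) := by rw [eq_iff_iff]; omega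
    have p8 : (c - r / 2 + 1 + r / 2 < ce) = (c + 1 < ce) := by rw [eq_iff_iff]; omega
    simp only [p1, p2, p3, p4, p5, p6, p7, p8]
    have v1 : c - r / 2 + (r + -1 - 1) / 2 = c + -1 := by omega
    have v2 : c - r / 2 + 1 + (r + -1 - 1) / 2 = c := by omega
    have v3 : c - r / 2 + -1 + r / 2 = c + -1 := by omega
    have v4 : c - r / 2 + 1 + r / 2 = c + 1 := by omega
    have v5 : c - r / 2 + r / 2 = c := by omega
    split_ifs <;> simp [hp, h2, h3, v1, v2, v3, v4, v5]
  · have hp1 : r % 2 = 1 := by omega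
    have h2 : (r + -1) % 2 = 0 := by omega
    have h3 : (r + 1) % 2 = 0 := by omega
    simp [pvAxialDirs, Qa, hp1, not_or, not_lt, not_le]
    simp only [List.filter_cons, List.filter_nil]
    simp [h2, h3, hp1]
    have q1 : (0 ≤ c - (r - 1) / 2 + (r + -1) / 2) = (0 ≤ c) := by rw [eq_iff_iff]; omega
    have q2 : (c - (r - 1) / 2 + (r + -1) / 2 < ce) = (c < ce) := by rw [eq_iff_iff]; omega
    have q3 : (0 ≤ c - (r - 1) / 2 + 1 + (r + -1) / 2) = (0 ≤ c + 1) := by rw [eq_iff_iff]; omega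
    have q4 : (c - (r - 1) / 2 + 1 + (r + -1) / 2 < ce) = (c + 1 < ce) := by rw [eq_iff_iff]; omega
    have q5 : (0 ≤ c - (r - 1) / 2 + -1 + (r - 1) / 2) = (1 ≤ c) := by rw [eq_iff_iff]; omega
    have q6 : (c - (r - 1) / 2 + -1 + (r - 1) / 2 < ce) = (c ≤ ce) := by rw [eq_iff_iff]; omega
    have q7 : (0 ≤ c - (r - 1) / 2 + 1 + (r - 1) / 2) = (0 ≤ c + 1) := by rw [eq_iff_iff]; omega
    have q8 : (c - (r - 1) / 2 + 1 + (r - 1) / 2 < ce) = (c + 1 < ce) := by rw [eq_iff_iff]; omega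
    have q9 : (0 ≤ c - (r - 1) / 2 + -1 + (r + 1) / 2) = (0 ≤ c) := by rw [eq_iff_iff]; omega
    have q10 : (c - (r - 1) / 2 + -1 + (r + 1) / 2 < ce) = (c < ce) := by rw [eq_iff_iff]; omega
    have q11 : (0 ≤ c - (r - 1) / 2 + (r + 1) / 2) = (0 ≤ c + 1) := by rw [eq_iff_iff]; omega
    have q12 : (c - (r - 1) / 2 + (r + 1) / 2 < ce) = (c + 1 < ce) := by rw [eq_iff_iff]; omega
    simp only [q1, q2, q3, q4, q5, q6, q7, q8, q9, q10, q11, q12]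
    have w1 : c - (r - 1) / 2 + (r + -1) / 2 = c := by omega
    have w2 : c - (r - 1) / 2 + 1 + (r + -1) / 2 = c + 1 := by omega
    have w3 : c - (r - 1) / 2 + -1 + (r - 1) / 2 = c + -1 := by omega
    have w4 : c - (r - 1) / 2 + 1 + (r - 1) / 2 = c + 1 := by omega
    have w5 : c - (r - 1) / 2 + -1 + (r + 1) / 2 = c := by omega
    have w6 : c - (r - 1) / 2 + (r + 1) / 2 = c + 1 := by omega
    split_ifs <;> simp [hp1, h2, h3, w1, w2, w3, w4, w5, w6]

-- ===== VERDICT (by name: the statement is the Claim_ definition above) =====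
theorem nei_of_spec : Claim_equal_nei_of := by
  intro node r_end c_end _
  obtain ⟨r, c⟩ := node
  exact nei_of_main r c r_end c_end
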